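-- pv_equiv track=rewrite | github.com/gupessanha/AlgEst | conv_not.py | prefixa_p_infixa_posfixa
-- ===== SOURCE A (Python) =====
-- def prefixa_p_infixa_posfixa(exp, index=0):
--     if exp[index].isdigit():
--         return exp[index], exp[index], index + 1
--
--     op = exp[index]
--     index += 1
--
--     left_infixa, left_posfixa, index = prefixa_p_infixa_posfixa(exp, index)
--     right_infixa, right_posfixa, index = prefixa_p_infixa_posfixa(exp, index)
--
--     infixa = "(" + left_infixa + op + right_infixa + ")"
--     posfixa = left_posfixa + right_posfixa + op
--
--     return infixa, posfixa, index
-- ===== SOURCE B (Python) =====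
-- def prefixa_p_infixa_posfixa(exp, index=0):
--     # Explicit stack machine instead of recursion: scan tokens left to right,
--     # push operator frames, reduce completed subexpressions.
--     stack = []  # frames (op, left) where left is None or (infix, postfix)
--     i = index
--     while True:
--         c = exp[i]
--         i += 1
--         if not c.isdigit():
--             stack.append((c, None))
--             continue
--         cur = (c, c)
--         while stack and stack[-1][1] is not None:
--             op, left = stack.pop()
--             cur = ("(" + left[0] + op + cur[0] + ")", left[1] + cur[1] + op)
--         if not stack:
--             return cur[0], cur[1], i
--         stack[-1] = (stack[-1][0], cur)
-- ===== Notes on version B (the rewrite author's own statement) =====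
-- stated objective: alternative
-- what changed: Replaced A's recursive descent with an iterative left-to-right scan driving an explicit stack of pending operator frames that are reduced as soon as their right operand completes.
import Mathlib
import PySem

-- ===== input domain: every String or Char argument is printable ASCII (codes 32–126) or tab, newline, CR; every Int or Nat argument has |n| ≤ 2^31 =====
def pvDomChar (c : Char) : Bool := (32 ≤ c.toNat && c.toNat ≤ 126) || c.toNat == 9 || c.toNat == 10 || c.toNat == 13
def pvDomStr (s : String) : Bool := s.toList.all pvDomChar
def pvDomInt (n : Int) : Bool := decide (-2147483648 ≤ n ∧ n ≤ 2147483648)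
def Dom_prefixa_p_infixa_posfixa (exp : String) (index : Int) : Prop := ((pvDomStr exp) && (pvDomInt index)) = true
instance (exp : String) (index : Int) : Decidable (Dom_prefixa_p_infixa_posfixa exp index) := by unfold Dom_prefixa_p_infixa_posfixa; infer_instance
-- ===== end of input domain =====

-- B replaces A's recursion by an explicit left-to-right stack machine (objective: alternative decomposition).
-- Both ports are made total with a fuel counter (one unit per character read; 2*len+1 always suffices where
-- Python returns); `none` marks the point where Python raises IndexError — those inputs are outside Pre_.

-- ===== PORT A =====
-- Literal port of A's recursion; the fuel is threaded through like `index` is (one unit per read),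
-- purely as a totality device, and the leftover fuel is returned alongside the result.
def pvGoA (cs : List Char) (fuel : Nat) (index : Int) :
    Option ((String × String × Int) × Nat) :=
  match fuel with
  | 0 => none
  | f + 1 =>
    match PySem.List.pyGet? cs index with
    | none => none                      -- exp[index] raises IndexError
    | some c =>
      if PySem.Chars.isdigit c then
        some ((String.singleton c, String.singleton c, index + 1), f)
      else
        match pvGoA cs f (index + 1) with
        | none => none
        | some ((li, lp, i1), f1) =>
          -- f1 ≤ f always holds (pvGoA_fuel_lt below); `min` only makes termination evident
          match pvGoA cs (min f1 f) i1 with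
          | none => none
          | some ((ri, rp, i2), f2) =>
            some (("(" ++ li ++ String.singleton c ++ ri ++ ")",
                   lp ++ rp ++ String.singleton c, i2), f2)
termination_by fuel

def prefixa_p_infixa_posfixa (exp : String) (index : Int) : String × String × Int :=
  ((pvGoA exp.toList (2 * exp.toList.length + 1) index).map Prod.fst).getD ("", "", 0)

-- ===== PORT B =====
-- B's inner while-loop: pop frames that already hold a left operand, combining them with `cur`.
def pvPopCombine (stack : List (Char × Option (String × String))) (cur : String × String) :
    List (Char × Option (String × String)) × (String × String) :=
  match stack with
  | [] => ([], cur)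
  | (op, none) :: rest => ((op, none) :: rest, cur)
  | (op, some l) :: rest =>
      pvPopCombine rest ("(" ++ l.1 ++ String.singleton op ++ cur.1 ++ ")",
                         l.2 ++ cur.2 ++ String.singleton op)

-- B's outer while-loop: read a token, push an operator frame or reduce with the digit leaf.
def pvGoB (cs : List Char) (fuel : Nat) (i : Int)
    (stack : List (Char × Option (String × String))) : Option (String × String × Int) :=
  match fuel with
  | 0 => none
  | f + 1 =>
    match PySem.List.pyGet? cs i with
    | none => none                      -- exp[i] raises IndexError
    | some c =>
      if PySem.Chars.isdigit c then
        match pvPopCombine stack (String.singleton c, String.singleton c) with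
        | ([], cur) => some (cur.1, cur.2, i + 1)
        | ((op, _) :: rest, cur) => pvGoB cs f (i + 1) ((op, some cur) :: rest)
      else
        pvGoB cs f (i + 1) ((c, none) :: stack)

def prefixa_p_infixa_posfixa_alt (exp : String) (index : Int) : String × String × Int :=
  (pvGoB exp.toList (2 * exp.toList.length + 1) index []).getD ("", "", 0)

-- ===== PRECONDITION & SPEC =====
-- Pre_ holds exactly where Python A returns (elsewhere it raises IndexError); the two ports
-- happen to agree everywhere (they mark the raise point identically), so the proof needs no more.
-- `need` counter after reading m tokens from position index: A returns exactly when the counter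
-- reaches 0 before an out-of-range read.
def pvNeed (cs : List Char) (index : Int) : Nat → Int
  | 0 => 1
  | m + 1 =>
      pvNeed cs index m +
        (if PySem.Chars.isdigit ((PySem.List.pyGet? cs (index + m)).getD ' ') then -1 else 1)

-- Pre_ holds exactly on the inputs where Python A returns normally (elsewhere A raises IndexError):
-- a balanced prefix expression starts at `index` and is completed before the index runs out of range.
def Pre_prefixa_p_infixa_posfixa (exp : String) (index : Int) : Prop :=
  -(exp.toList.length : Int) ≤ index ∧
  ∃ k : Nat, k < 2 * exp.toList.length ∧ index + k < exp.toList.length ∧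
    pvNeed exp.toList index (k + 1) = 0

instance (exp : String) (index : Int) : Decidable (Pre_prefixa_p_infixa_posfixa exp index) := by
  unfold Pre_prefixa_p_infixa_posfixa; infer_instance

def pvWitness_prefixa_p_infixa_posfixa : String × Int := ("+1*23", 0)

def Spec_prefixa_p_infixa_posfixa (exp : String) (index : Int) (out : String × String × Int) : Prop :=
  out = prefixa_p_infixa_posfixa_alt exp index
instance (exp : String) (index : Int) (out : String × String × Int) :
    Decidable (Spec_prefixa_p_infixa_posfixa exp index out) := by
  unfold Spec_prefixa_p_infixa_posfixa; infer_instance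

-- ===== CLAIM (what is proved, stated in full; the proofs are below) =====
def Claim_equal_prefixa_p_infixa_posfixa : Prop :=
  ∀ (exp : String) (index : Int), Dom_prefixa_p_infixa_posfixa exp index →
    Pre_prefixa_p_infixa_posfixa exp index →
    Spec_prefixa_p_infixa_posfixa exp index (prefixa_p_infixa_posfixa exp index)

-- ===== LEMMAS AND PROOFS =====

-- leftover fuel strictly decreases
theorem pvGoA_fuel_lt (cs : List Char) :
    ∀ fuel index r f', pvGoA cs fuel index = some (r, f') → f' < fuel := by
  intro fuel
  induction fuel using Nat.strong_induction_on with
  | _ fuel ih =>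
    intro index r f' h
    match fuel with
    | 0 => rw [pvGoA.eq_def] at h; simp at h
    | f + 1 =>
      rw [pvGoA.eq_def] at h
      cases hg : PySem.List.pyGet? cs index with
      | none => rw [hg] at h; simp at h
      | some c =>
        rw [hg] at h
        simp only at h
        by_cases hd : PySem.Chars.isdigit c = true
        · rw [if_pos hd] at h
          simp only [Option.some.injEq, Prod.mk.injEq] at h
          omega
        · rw [if_neg hd] at h
          cases h1 : pvGoA cs f (index + 1) with
          | none => rw [h1] at h; simp at h
          | some v1 =>
            obtain ⟨⟨li, lp, i1⟩, f1⟩ := v1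
            rw [h1] at h
            simp only at h
            cases h2 : pvGoA cs (min f1 f) i1 with
            | none => rw [h2] at h; simp at h
            | some v2 =>
              obtain ⟨⟨ri, rp, i2⟩, f2⟩ := v2
              rw [h2] at h
              simp only [Option.some.injEq, Prod.mk.injEq] at h
              have hf2 : f2 < min f1 f := ih (min f1 f) (by omega) _ _ _ h2
              omega

-- the stack machine simulates A's recursion: with any pending stack, running B from position i
-- equals first computing A's subexpression at i, then reducing it into the stack.
theorem pvGoB_eq (cs : List Char) :
    ∀ fuel i stack,
      pvGoB cs fuel i stack =
        match pvGoA cs fuel i with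
        | none => none
        | some ((fi, po, j), f') =>
          match pvPopCombine stack (fi, po) with
          | ([], cur) => some (cur.1, cur.2, j)
          | ((op, _) :: rest, cur) => pvGoB cs f' j ((op, some cur) :: rest) := by
  intro fuel
  induction fuel using Nat.strong_induction_on with
  | _ fuel ih =>
    intro i stack
    match fuel with
    | 0 => rw [pvGoA.eq_def, pvGoB.eq_def]
    | f + 1 =>
      rw [pvGoA.eq_def, pvGoB.eq_def]
      cases hg : PySem.List.pyGet? cs i with
      | none => rfl
      | some c =>
        show (if PySem.Chars.isdigit c = true then
                match pvPopCombine stack (String.singleton c, String.singleton c) with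
                | ([], cur) => some (cur.1, cur.2, i + 1)
                | ((op, _) :: rest, cur) => pvGoB cs f (i + 1) ((op, some cur) :: rest)
              else pvGoB cs f (i + 1) ((c, none) :: stack)) =
            match (if PySem.Chars.isdigit c = true then
                     some ((String.singleton c, String.singleton c, i + 1), f)
                   else
                     match pvGoA cs f (i + 1) with
                     | none => none
                     | some ((li, lp, i1), f1) =>
                       match pvGoA cs (min f1 f) i1 with
                       | none => none
                       | some ((ri, rp, i2), f2) =>
                         some (("(" ++ li ++ String.singleton c ++ ri ++ ")",
                                lp ++ rp ++ String.singleton c, i2), f2)) with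
            | none => none
            | some ((fi, po, j), f') =>
              match pvPopCombine stack (fi, po) with
              | ([], cur) => some (cur.1, cur.2, j)
              | ((op, _) :: rest, cur) => pvGoB cs f' j ((op, some cur) :: rest)
        by_cases hd : PySem.Chars.isdigit c = true
        · rw [if_pos hd, if_pos hd]
        · rw [if_neg hd, if_neg hd]
          rw [ih f (by omega) (i + 1) ((c, none) :: stack)]
          cases h1 : pvGoA cs f (i + 1) with
          | none => rfl
          | some v1 =>
            obtain ⟨⟨li, lp, i1⟩, f1⟩ := v1
            have hf1 : f1 < f := pvGoA_fuel_lt cs f (i + 1) _ _ h1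
            simp only [pvPopCombine]
            rw [ih f1 (by omega) i1 ((c, some (li, lp)) :: stack)]
            rw [Nat.min_eq_left (Nat.le_of_lt hf1)]
            cases h2 : pvGoA cs f1 i1 with
            | none => rfl
            | some v2 =>
              obtain ⟨⟨ri, rp, i2⟩, f2⟩ := v2
              simp only [pvPopCombine]

-- ===== VERDICT (by name: the statement is the Claim_ definition above) =====
theorem prefixa_p_infixa_posfixa_spec : Claim_equal_prefixa_p_infixa_posfixa := by
  intro exp index _ _
  unfold Spec_prefixa_p_infixa_posfixa prefixa_p_infixa_posfixa prefixa_p_infixa_posfixa_alt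
  rw [pvGoB_eq]
  cases h : pvGoA exp.toList (2 * exp.toList.length + 1) index with
  | none => simp
  | some v =>
    obtain ⟨⟨fi, po, j⟩, f'⟩ := v
    simp [pvPopCombine]
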